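-- pv_equiv track=rewrite | github.com/recommend-games/blog | experiments/menace/menace/__main__.py | find_all_rotations
-- ===== SOURCE A (Python) =====
-- rotations = [
--     [0, 1, 2, 3, 4, 5, 6, 7, 8],
--     [0, 3, 6, 1, 4, 7, 2, 5, 8],
--     [6, 3, 0, 7, 4, 1, 8, 5, 2],
--     [6, 7, 8, 3, 4, 5, 0, 1, 2],
--     [8, 7, 6, 5, 4, 3, 2, 1, 0],
--     [8, 5, 2, 7, 4, 1, 6, 3, 0],
--     [2, 5, 8, 1, 4, 7, 0, 3, 6],
--     [2, 1, 0, 5, 4, 3, 8, 7, 6],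
-- ]
--
-- def apply_rotation(pos, rot):
--     new_pos = ""
--     for j in range(9):
--         new_pos += pos[rot[j]]
--     return new_pos
--
-- def find_all_rotations(pos):
--     max_rot = []
--     max_pos = ""
--     for i, rot in enumerate(rotations):
--         try_pos = apply_rotation(pos, rot)
--         if try_pos > max_pos:
--             max_pos = try_pos
--             max_rot = [i]
--         elif try_pos == max_pos:
--             max_rot.append(i)
--     return max_rot
-- ===== SOURCE B (Python) =====
-- rotations = [
--     [0, 1, 2, 3, 4, 5, 6, 7, 8],
--     [0, 3, 6, 1, 4, 7, 2, 5, 8],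
--     [6, 3, 0, 7, 4, 1, 8, 5, 2],
--     [6, 7, 8, 3, 4, 5, 0, 1, 2],
--     [8, 7, 6, 5, 4, 3, 2, 1, 0],
--     [8, 5, 2, 7, 4, 1, 6, 3, 0],
--     [2, 5, 8, 1, 4, 7, 0, 3, 6],
--     [2, 1, 0, 5, 4, 3, 8, 7, 6],
-- ]
--
-- def find_all_rotations(pos):
--     # Column-wise tournament: never materialize rotated strings; eliminate
--     # rotations square by square, keeping only those whose char is maximal.
--     cand = list(range(len(rotations)))
--     for j in range(9):
--         best = max(pos[rotations[i][j]] for i in cand)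
--         cand = [i for i in cand if pos[rotations[i][j]] == best]
--     return cand
-- ===== Notes on version B (the rewrite author's own statement) =====
-- stated objective: alternative
-- what changed: A materializes each rotated 9-char string and keeps a running lexicographic maximum with a tie index list; B never builds the rotated strings: it runs a column-wise tournament over the 9 board squares, at each column keeping only the candidate rotations whose character there is maximal.
import Mathlib
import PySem

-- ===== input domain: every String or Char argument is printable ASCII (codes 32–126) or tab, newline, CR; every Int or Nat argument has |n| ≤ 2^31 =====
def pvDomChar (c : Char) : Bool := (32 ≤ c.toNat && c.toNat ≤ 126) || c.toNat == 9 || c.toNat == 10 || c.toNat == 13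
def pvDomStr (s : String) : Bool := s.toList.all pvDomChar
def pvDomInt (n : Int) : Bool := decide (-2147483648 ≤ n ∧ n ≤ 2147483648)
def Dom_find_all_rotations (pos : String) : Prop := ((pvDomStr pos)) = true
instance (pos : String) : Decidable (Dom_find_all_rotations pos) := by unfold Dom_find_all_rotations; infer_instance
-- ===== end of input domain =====

-- B replaces A's build-each-rotated-string running-max loop by a column-wise tournament
-- that eliminates candidate rotations square by square (same cost, different algorithm).

-- ===== PORT A =====
-- module constant `rotations` (shared by Source A and Source B)
def pvRotations : List (List Int) :=
  [[0, 1, 2, 3, 4, 5, 6, 7, 8],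
   [0, 3, 6, 1, 4, 7, 2, 5, 8],
   [6, 3, 0, 7, 4, 1, 8, 5, 2],
   [6, 7, 8, 3, 4, 5, 0, 1, 2],
   [8, 7, 6, 5, 4, 3, 2, 1, 0],
   [8, 5, 2, 7, 4, 1, 6, 3, 0],
   [2, 5, 8, 1, 4, 7, 0, 3, 6],
   [2, 1, 0, 5, 4, 3, 8, 7, 6]]

-- helper `apply_rotation` (A only), on the List Char side; Python string comparison/equality
-- coincides with Lean's on toList. The `.getD` defaults are unreachable inside Pre_
-- (rot[j] is always in 0..8, and pos has ≥ 9 chars).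
def pvApplyRotation (pos : List Char) (rot : List Int) : List Char :=
  (PySem.List.pyRange 0 9 1).foldl
    (fun new_pos j => new_pos ++ [(PySem.List.pyGet? pos ((PySem.List.pyGet? rot j).getD 0)).getD ' '])
    []

def find_all_rotations (pos : String) : List Int :=
  ((PySem.List.enumerate pvRotations 0).foldl
    (fun (st : List Int × List Char) p =>
      let try_pos := pvApplyRotation pos.toList p.2
      if st.2 < try_pos then ([p.1], try_pos)
      else if try_pos = st.2 then (st.1 ++ [p.1], st.2)
      else st)
    ([], [])).1

-- ===== PORT B =====
-- pos[rotations[i][j]]  (the `.getD` defaults are unreachable inside Pre_)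
def pvCharAt (pos : List Char) (i j : Int) : Char :=
  (PySem.List.pyGet? pos
    ((PySem.List.pyGet? ((PySem.List.pyGet? pvRotations i).getD []) j).getD 0)).getD ' '

def find_all_rotations_alt (pos : String) : List Int :=
  (PySem.List.pyRange 0 9 1).foldl
    (fun cand j =>
      let best := (PySem.List.max? (cand.map (fun i => pvCharAt pos.toList i j)) (fun c => c)).getD ' '
      cand.filter (fun i => pvCharAt pos.toList i j == best))
    (PySem.List.pyRange 0 8 1)

-- ===== PRECONDITION & SPEC =====
-- Pre_ excludes exactly the inputs where Python A raises IndexError (pos shorter than 9 chars).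
def Pre_find_all_rotations (pos : String) : Prop := 9 ≤ pos.toList.length
instance (pos : String) : Decidable (Pre_find_all_rotations pos) := by unfold Pre_find_all_rotations; infer_instance
def pvWitness_find_all_rotations : String := "XOX OX O "
def Spec_find_all_rotations (pos : String) (out : List Int) : Prop := out = find_all_rotations_alt pos
instance (pos : String) (out : List Int) : Decidable (Spec_find_all_rotations pos out) := by unfold Spec_find_all_rotations; infer_instance

-- ===== CLAIM (what is proved, stated in full; the proofs are below) =====
def Claim_equal_find_all_rotations : Prop := ∀ (pos : String), Dom_find_all_rotations pos → Pre_find_all_rotations pos → Spec_find_all_rotations pos (find_all_rotations pos)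

-- ===== LEMMAS AND PROOFS =====

-- the board seen by rotation i, as B accesses it column by column
def pvG (pos : List Char) (i : Int) : List Char :=
  (PySem.List.pyRange 0 9 1).map (fun j => pvCharAt pos i j)

-- one tournament step of B, over Nat columns and pvG
def pvStep (pos : List Char) (cand : List Int) (j : Nat) : List Int :=
  let best := (PySem.List.max? (cand.map (fun i => (pvG pos i).getD j ' ')) (fun c => c)).getD ' '
  cand.filter (fun i => (pvG pos i).getD j ' ' == best)

-- the order on List Char is Mathlib's lexicographic one: < is List.Lex (· < ·)
theorem pv_cons_lt_cons (x y : Char) (s t : List Char) :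
    (x :: s) < (y :: t) ↔ x < y ∨ (x = y ∧ s < t) := by
  constructor
  · intro h
    cases h with
    | cons h => exact Or.inr ⟨rfl, h⟩
    | rel h => exact Or.inl h
  · rintro (h | ⟨rfl, h⟩)
    · exact List.Lex.rel h
    · exact List.Lex.cons h

theorem pv_cons_le_cons_iff (x y : Char) (s t : List Char) :
    (x :: s) ≤ (y :: t) ↔ x < y ∨ (x = y ∧ s ≤ t) := by
  rw [le_iff_lt_or_eq, le_iff_lt_or_eq, pv_cons_lt_cons, List.cons_eq_cons]
  tauto

theorem pv_nil_le (x : List Char) : ([] : List Char) ≤ x := by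
  cases x with
  | nil => exact le_refl _
  | cons c t => exact le_of_lt (List.Lex.nil)

-- running max over lists: generic helpers
theorem pv_foldl_max_le {a : Type} [LinearOrder a] (l : List a) (x b : a)
    (ha : x <= b) (hl : forall y, y ∈ l -> y <= b) : l.foldl max x <= b := by
  induction l generalizing x with
  | nil => exact ha
  | cons z t ih =>
    exact ih _ (max_le ha (hl z List.mem_cons_self)) (fun y hy => hl y (List.mem_cons_of_mem _ hy))

theorem pv_mem_le_foldl_max {a : Type} [LinearOrder a] (l : List a) (x y : a)
    (hx : y ∈ l) : y <= l.foldl max x := by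
  induction l generalizing x with
  | nil => cases hx
  | cons z t ih =>
    rcases List.mem_cons.mp hx with h | h
    · subst h
      exact le_trans (le_max_right x y) (PySem.List.le_foldl_max t (max x y)).1
    · exact ih _ h

-- foldl max [] over a NONEMPTY list of lists is attained (every list is >= [])
theorem pv_foldl_max_nil_mem (l : List (List Char)) (hne : l ≠ []) :
    l.foldl max [] ∈ l := by
  cases l with
  | nil => exact absurd rfl hne
  | cons x t =>
    have hx : (x :: t).foldl max [] = t.foldl max x := by
      simp [List.foldl_cons, max_eq_right (pv_nil_le x)]
    rw [hx]
    rcases PySem.List.foldl_max_mem t x with h | h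
    · rw [h]; exact List.mem_cons_self
    · exact List.mem_cons_of_mem _ h

-- lexicographic order on equal-length lists, last-element decomposition
theorem pv_append_le_append (u : List Char) : forall (v : List Char) (a b : Char),
    u.length = v.length -> (u ++ [a] ≤ v ++ [b] ↔ u < v ∨ (u = v ∧ a ≤ b)) := by
  induction u with
  | nil =>
    intro v a b h
    cases v with
    | nil =>
      simp only [List.nil_append, pv_cons_le_cons_iff]
      simp [le_iff_lt_or_eq]

    | cons y t => simp at h
  | cons x s ih =>
    intro v a b h
    cases v with
    | nil => simp at h
    | cons y t =>
      simp only [List.length_cons, Nat.add_right_cancel_iff] at h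
      simp only [List.cons_append, pv_cons_le_cons_iff, pv_cons_lt_cons, List.cons_eq_cons]
      rw [ih t a b h]
      tauto

theorem pv_append_eq_append (u v : List Char) (a b : Char) (h : u.length = v.length) :
    u ++ [a] = v ++ [b] ↔ u = v ∧ a = b := by
  constructor
  · intro he
    have := List.append_inj he h
    simpa using this
  · rintro ⟨h1, h2⟩; rw [h1, h2]

theorem pv_take_succ_getD (l : List Char) (k : Nat) (hk : k < l.length) :
    l.take (k + 1) = l.take k ++ [l.getD k ' '] := by
  rw [List.take_add_one]
  congr 1
  simp [List.getElem?_eq_getElem hk]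

theorem pvG_length (pos : List Char) (i : Int) : (pvG pos i).length = 9 := by
  simp [pvG, PySem.List.pyRange]

-- the tournament invariant: after the first k columns, the survivors are exactly the
-- candidates whose k-prefix is the lexicographic maximum of all k-prefixes
theorem pv_invariant (pos : List Char) (cand0 : List Int) (hne : cand0 ≠ []) (k : Nat) (hk : k ≤ 9) :
    (List.range k).foldl (pvStep pos) cand0
      = cand0.filter (fun i => (pvG pos i).take k == (cand0.map (fun i => (pvG pos i).take k)).foldl max []) := by
  induction k with
  | zero =>
    have hz : ∀ (l : List Int), (l.map (fun i => (pvG pos i).take 0)).foldl max ([] : List Char) = [] := by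
      intro l; induction l with
      | nil => rfl
      | cons x t ih => simpa [List.take_zero, max_self] using ih
    rw [List.range_zero, List.foldl_nil, hz cand0]
    simp
  | succ k ih =>
    have hk9 : k < 9 := hk
    have ihk := ih (le_of_lt hk9)
    rw [List.range_succ, List.foldl_append, List.foldl_cons, List.foldl_nil, ihk]
    -- abbreviations
    set M : List Char := (cand0.map (fun i => (pvG pos i).take k)).foldl max [] with hM
    set C : List Int := cand0.filter (fun i => (pvG pos i).take k == M) with hC
    have hlen : ∀ i : Int, k < (pvG pos i).length := by intro i; rw [pvG_length]; exact hk9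
    -- M is attained, so C is nonempty
    have hMmem : M ∈ cand0.map (fun i => (pvG pos i).take k) := by
      apply pv_foldl_max_nil_mem
      simp [List.map_eq_nil_iff, hne]
    obtain ⟨i0, hi0, hMEq⟩ := List.mem_map.mp hMmem
    have hi0C : i0 ∈ C := by
      rw [hC]; exact List.mem_filter.mpr ⟨hi0, by simp [hMEq]⟩
    have hCne : C ≠ [] := List.ne_nil_of_mem hi0C
    have hMlen : M.length = k := by
      rw [← hMEq, List.length_take]
      exact Nat.min_eq_left (le_of_lt (hlen i0))
    -- best = running max of column-k chars over C
    obtain ⟨c0, Ct, hCform⟩ : ∃ c0 Ct, C = c0 :: Ct := by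
      cases hc : C with
      | nil => exact absurd hc hCne
      | cons a b => exact ⟨a, b, rfl⟩
    set col : Int → Char := fun i => (pvG pos i).getD k ' ' with hcol
    set best : Char := (Ct.map col).foldl max (col c0) with hbest
    have hmax? : (PySem.List.max? (C.map col) (fun c => c)).getD ' ' = best := by
      rw [hCform]
      simp only [List.map_cons]
      rw [PySem.List.max?_id_cons]
      rfl
    -- best is the max of col over C, and attained
    have hbest_ub : ∀ i ∈ C, col i ≤ best := by
      intro i hi
      rw [hCform] at hi
      rcases List.mem_cons.mp hi with h | h
      · subst h; exact (PySem.List.le_foldl_max _ _).1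
      · exact pv_mem_le_foldl_max _ _ _ (List.mem_map_of_mem h)
    have hbest_mem : ∃ i ∈ C, col i = best := by
      rcases PySem.List.foldl_max_mem (Ct.map col) (col c0) with h | h
      · exact ⟨c0, by rw [hCform]; exact List.mem_cons_self, h.symm⟩
      · obtain ⟨i, hi, hieq⟩ := List.mem_map.mp h
        exact ⟨i, by rw [hCform]; exact List.mem_cons_of_mem _ hi, by rw [hieq, hbest]⟩
    -- the (k+1)-prefix maximum is M ++ [best]
    have hM1 : (cand0.map (fun i => (pvG pos i).take (k + 1))).foldl max [] = M ++ [best] := by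
      apply le_antisymm
      · apply pv_foldl_max_le
        · exact pv_nil_le _
        · intro x hx
          obtain ⟨i, hi, hieq⟩ := List.mem_map.mp hx
          rw [← hieq, pv_take_succ_getD _ _ (hlen i)]
          rw [pv_append_le_append _ _ _ _ (by rw [List.length_take, hMlen]; exact Nat.min_eq_left (le_of_lt (hlen i)))]
          rcases lt_or_eq_of_le (pv_mem_le_foldl_max (cand0.map (fun i => (pvG pos i).take k)) [] _ (List.mem_map_of_mem hi) : (pvG pos i).take k ≤ M) with h | h
          · exact Or.inl h
          · refine Or.inr ⟨h, hbest_ub i ?_⟩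
            rw [hC]; exact List.mem_filter.mpr ⟨hi, by simp [h, hM]⟩
      · obtain ⟨i1, hi1, hi1eq⟩ := hbest_mem
        have hi1c : i1 ∈ cand0 := (List.mem_filter.mp (hC ▸ hi1)).1
        have hi1M : (pvG pos i1).take k = M := by
          have := (List.mem_filter.mp (hC ▸ hi1)).2
          simpa using this
        have : (pvG pos i1).take (k + 1) = M ++ [best] := by
          rw [pv_take_succ_getD _ _ (hlen i1), hi1M,
            show (pvG pos i1).getD k ' ' = col i1 from rfl, hi1eq]
        rw [← this]
        exact pv_mem_le_foldl_max _ _ _ (List.mem_map_of_mem hi1c)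
    -- put the step together
    rw [hM1]
    show C.filter (fun i => ((pvG pos i).getD k ' ' == (PySem.List.max? (C.map col) (fun c => c)).getD ' ')) = _
    rw [hmax?, hC, List.filter_filter]
    apply List.filter_congr
    intro i hi
    have h1 : (pvG pos i).take (k + 1) = (pvG pos i).take k ++ [col i] :=
      pv_take_succ_getD _ _ (hlen i)
    have hlen2 : ((pvG pos i).take k).length = M.length := by
      rw [List.length_take, hMlen]; exact Nat.min_eq_left (le_of_lt (hlen i))
    have hiff : ((pvG pos i).take (k + 1) = M ++ [best]) ↔
        ((pvG pos i).getD k ' ' = best ∧ (pvG pos i).take k = M) := by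
      rw [h1, pv_append_eq_append _ _ _ _ hlen2]
      exact ⟨fun h => ⟨h.2, h.1⟩, fun h => ⟨h.2, h.1⟩⟩
    apply Bool.eq_iff_iff.mpr
    simp only [Bool.and_eq_true, beq_iff_eq]
    exact hiff.symm

-- A's loop over any list of boards, related to max-then-filter
theorem pv_loopA_spec (l : List (List Char)) (s : Int) (acc : List Int) (m : List Char) :
    ((PySem.List.enumerate l s).foldl
      (fun (st : List Int × List Char) p =>
        if st.2 < p.2 then ([p.1], p.2)
        else if p.2 = st.2 then (st.1 ++ [p.1], st.2)
        else st)
      (acc, m)).1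
    = (if m = l.foldl max m then acc else [])
      ++ ((PySem.List.enumerate l s).filter (fun p => p.2 == l.foldl max m)).map (fun p => p.1) := by
  induction l generalizing s acc m with
  | nil => simp [PySem.List.enumerate_nil]
  | cons a t ih =>
    simp only [PySem.List.enumerate_cons, List.foldl_cons, List.filter_cons]
    rcases lt_trichotomy m a with hlt | heq | hgt
    · have hmax : max m a = a := max_eq_right hlt.le
      have hM : a ≤ t.foldl max a := (PySem.List.le_foldl_max t a).1
      have hne : m ≠ t.foldl max a := fun h => absurd (h ▸ hlt) (not_lt.mpr hM)
      simp only [hmax, if_pos hlt, ih, if_neg hne, beq_iff_eq]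
      split_ifs <;> simp
    · subst heq
      have hmax : max m m = m := max_self m
      simp only [hmax, lt_self_iff_false, if_false, ih, beq_iff_eq]
      split_ifs <;> simp
    · have hmax : max m a = m := max_eq_left hgt.le
      have hM : m ≤ t.foldl max m := (PySem.List.le_foldl_max t m).1
      have hne : a ≠ t.foldl max m := fun h => absurd (h ▸ hgt) (not_lt.mpr hM)
      simp only [hmax, if_neg (not_lt.mpr hgt.le), if_neg (fun h => absurd h (ne_of_lt hgt)), ih,
        beq_iff_eq, if_neg hne]

-- foldl-with-append builds the mapped list
theorem pv_foldl_append_map (l : List Int) (h : Int → Char) (acc : List Char) :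
    l.foldl (fun acc j => acc ++ [h j]) acc = acc ++ l.map h := by
  induction l generalizing acc with
  | nil => simp
  | cons x t ih => simp [ih]

theorem pv_applyRotation_eq_pvG (pos : List Char) (i : Int) (_hi : 0 ≤ i) (_hi8 : i < 8) :
    pvApplyRotation pos ((PySem.List.pyGet? pvRotations i).getD []) = pvG pos i := by
  unfold pvApplyRotation pvG
  rw [pv_foldl_append_map]
  simp only [List.nil_append]
  apply List.map_congr_left
  intro j _
  rfl

-- enumerate-filter-map over a list of boards, as a filter over the index range
theorem pv_enum_filter_map (M : List Char) (g : Int → List Char) :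
    ∀ (l : List (List Char)) (s : Int),
    (∀ (k : Nat) (h : k < l.length), l[k] = g (s + k)) →
    ((PySem.List.enumerate l s).filter (fun p => p.2 == M)).map (fun p => p.1)
      = (PySem.List.pyRange s (s + l.length) 1).filter (fun i => g i == M) := by
  intro l
  induction l with
  | nil =>
    intro s _
    rw [PySem.List.pyRange_one_eq_nil (by simp)]
    simp [PySem.List.enumerate_nil]
  | cons x t ih =>
    intro s h
    have hx : x = g s := by simpa using h 0 (by simp)
    have hrange : PySem.List.pyRange s (s + (↑(x :: t).length)) 1
        = s :: PySem.List.pyRange (s + 1) ((s + 1) + t.length) 1 := by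
      rw [PySem.List.pyRange_one_cons (by simp)]
      congr 2
      all_goals (push_cast [List.length_cons]; omega)
    have ht := ih (s + 1) (fun k hk => by
      have hh := h (k + 1) (by simpa using hk)
      simpa [add_assoc, add_comm, add_left_comm] using hh)
    rw [PySem.List.enumerate_cons, hrange]
    simp only [List.filter_cons, hx]
    by_cases hc : (g s == M) = true
    · simp [hc, ht]
    · simp [hc, ht]

-- B's port, re-expressed as the Nat-column tournament fold
theorem pv_altB_eq_fold (pos : String) :
    find_all_rotations_alt pos
      = (List.range 9).foldl (pvStep pos.toList) [0, 1, 2, 3, 4, 5, 6, 7] := by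
  rfl

-- ===== VERDICT (by name: the statement is the Claim_ definition above) =====
theorem find_all_rotations_spec : Claim_equal_find_all_rotations := by
  intro pos _ _
  unfold Spec_find_all_rotations find_all_rotations
  -- A's loop, in max-then-filter form
  set f : List Int → List Char := fun rot => pvApplyRotation pos.toList rot with hf
  have hA : ((PySem.List.enumerate pvRotations 0).foldl
      (fun (st : List Int × List Char) p =>
        let try_pos := f p.2
        if st.2 < try_pos then ([p.1], try_pos)
        else if try_pos = st.2 then (st.1 ++ [p.1], st.2)
        else st)
      (([] : List Int), ([] : List Char)))
      = ((PySem.List.enumerate (pvRotations.map f) 0).foldl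
      (fun (st : List Int × List Char) p =>
        if st.2 < p.2 then ([p.1], p.2)
        else if p.2 = st.2 then (st.1 ++ [p.1], st.2)
        else st)
      (([] : List Int), ([] : List Char))) := by
    rw [show PySem.List.enumerate (pvRotations.map f) 0
        = (PySem.List.enumerate pvRotations 0).map (fun p => (p.1, f p.2)) by
      simp [pvRotations, PySem.List.enumerate_cons, PySem.List.enumerate_nil]]
    rw [List.foldl_map]
  rw [hA, pv_loopA_spec, ite_self, List.nil_append]
  -- B's tournament, via the invariant at k = 9
  have hne : ([0, 1, 2, 3, 4, 5, 6, 7] : List Int) ≠ [] := by simp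
  have htake : ∀ i : Int, (pvG pos.toList i).take 9 = pvG pos.toList i := by
    intro i
    exact List.take_of_length_le (le_of_eq (pvG_length pos.toList i))
  have hB : find_all_rotations_alt pos
      = ([0, 1, 2, 3, 4, 5, 6, 7] : List Int).filter
          (fun i => pvG pos.toList i
            == (([0, 1, 2, 3, 4, 5, 6, 7] : List Int).map (fun i => pvG pos.toList i)).foldl max []) := by
    rw [pv_altB_eq_fold, pv_invariant pos.toList _ hne 9 (le_refl 9)]
    simp only [htake]
  rw [hB]
  -- both sides coincide board by board (the 8 rotations are literals, and
  -- pvApplyRotation builds exactly the board pvG reads column by column)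
  have h0 : pvApplyRotation pos.toList [0, 1, 2, 3, 4, 5, 6, 7, 8] = pvG pos.toList 0 :=
    pv_applyRotation_eq_pvG pos.toList 0 (by norm_num) (by norm_num)
  have h1 : pvApplyRotation pos.toList [0, 3, 6, 1, 4, 7, 2, 5, 8] = pvG pos.toList 1 :=
    pv_applyRotation_eq_pvG pos.toList 1 (by norm_num) (by norm_num)
  have h2 : pvApplyRotation pos.toList [6, 3, 0, 7, 4, 1, 8, 5, 2] = pvG pos.toList 2 :=
    pv_applyRotation_eq_pvG pos.toList 2 (by norm_num) (by norm_num)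
  have h3 : pvApplyRotation pos.toList [6, 7, 8, 3, 4, 5, 0, 1, 2] = pvG pos.toList 3 :=
    pv_applyRotation_eq_pvG pos.toList 3 (by norm_num) (by norm_num)
  have h4 : pvApplyRotation pos.toList [8, 7, 6, 5, 4, 3, 2, 1, 0] = pvG pos.toList 4 :=
    pv_applyRotation_eq_pvG pos.toList 4 (by norm_num) (by norm_num)
  have h5 : pvApplyRotation pos.toList [8, 5, 2, 7, 4, 1, 6, 3, 0] = pvG pos.toList 5 :=
    pv_applyRotation_eq_pvG pos.toList 5 (by norm_num) (by norm_num)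
  have h6 : pvApplyRotation pos.toList [2, 5, 8, 1, 4, 7, 0, 3, 6] = pvG pos.toList 6 :=
    pv_applyRotation_eq_pvG pos.toList 6 (by norm_num) (by norm_num)
  have h7 : pvApplyRotation pos.toList [2, 1, 0, 5, 4, 3, 8, 7, 6] = pvG pos.toList 7 :=
    pv_applyRotation_eq_pvG pos.toList 7 (by norm_num) (by norm_num)
  have hlist : pvRotations.map f
      = [pvG pos.toList 0, pvG pos.toList 1, pvG pos.toList 2, pvG pos.toList 3,
         pvG pos.toList 4, pvG pos.toList 5, pvG pos.toList 6, pvG pos.toList 7] := by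
    simp [pvRotations, hf, h0, h1, h2, h3, h4, h5, h6, h7]
  rw [hlist]
  rw [pv_enum_filter_map _ (fun i => pvG pos.toList i) _ 0 (by
    intro k hk
    simp at hk
    interval_cases k <;> norm_num)]
  rw [show ((0 : Int) + ↑([pvG pos.toList 0, pvG pos.toList 1, pvG pos.toList 2, pvG pos.toList 3,
      pvG pos.toList 4, pvG pos.toList 5, pvG pos.toList 6, pvG pos.toList 7].length)) = (8 : Int) by
    simp]
  rw [show PySem.List.pyRange 0 8 1 = [0, 1, 2, 3, 4, 5, 6, 7] from by decide]
  simp only [List.map_cons, List.map_nil]
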